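-- pv_equiv track=rewrite | github.com/cjcao2013/superpowers | skills/migrating-to-tap/analyze.py | detect_case_id_column
-- ===== SOURCE A (Python) =====
-- def detect_case_id_column(headers: list[str]) -> str | None:
--     candidates = ["TC_ID", "TestCase_ID", "Case_ID", "ID", "Test_ID", "TCID"]
--     for c in candidates:
--         for h in headers:
--             if h and c.lower() == h.lower():
--                 return h
--     for h in headers:
--         if h and "id" in h.lower():
--             return h
--     return headers[0] if headers else None
-- ===== SOURCE B (Python) =====
-- def detect_case_id_column(headers: list[str]) -> str | None:
--     cand_rank = {c.lower(): i for i, c in enumerate(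
--         ["TC_ID", "TestCase_ID", "Case_ID", "ID", "Test_ID", "TCID"])}
--     best = None  # (rank, header) with the smallest rank seen, earliest on ties
--     for h in headers:
--         if not h:
--             continue
--         hl = h.lower()
--         r = cand_rank.get(hl, 100 if "id" in hl else None)
--         if r is not None and (best is None or r < best[0]):
--             best = (r, h)
--     if best is not None:
--         return best[1]
--     return headers[0] if headers else None
-- ===== Notes on version B (the rewrite author's own statement) =====
-- stated objective: faster
-- what changed: Replaces A's candidate-outer nested scan (up to 6 passes over headers plus a substring pass) by a single left-to-right pass that ranks each header via a precomputed lowercase-candidate dict and keeps the earliest strictly-smallest rank.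
import Mathlib
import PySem

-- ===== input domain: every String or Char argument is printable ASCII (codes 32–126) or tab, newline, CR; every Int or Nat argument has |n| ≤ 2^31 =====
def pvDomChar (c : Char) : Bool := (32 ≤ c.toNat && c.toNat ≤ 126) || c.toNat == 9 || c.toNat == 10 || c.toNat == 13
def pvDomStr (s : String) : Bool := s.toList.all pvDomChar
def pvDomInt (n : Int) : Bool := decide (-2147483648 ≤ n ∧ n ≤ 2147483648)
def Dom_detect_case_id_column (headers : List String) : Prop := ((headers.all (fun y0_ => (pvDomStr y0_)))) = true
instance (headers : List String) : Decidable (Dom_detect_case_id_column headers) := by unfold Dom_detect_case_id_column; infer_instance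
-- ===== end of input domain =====

-- B replaces A's candidate-outer nested scan (up to 7 passes over headers) by one
-- left-to-right pass keeping the earliest smallest-ranked header (faster by a constant factor).

-- ===== PORT A =====
def pvCandidates : List String := ["TC_ID", "TestCase_ID", "Case_ID", "ID", "Test_ID", "TCID"]

-- outer 'for c in candidates' loop; the inner 'for h in headers … return h' is find?
def pvPhase1 : List String → List String → Option String
  | [], _ => none
  | c :: cs, headers =>
    match headers.find? (fun h => !(h == "") && (PySem.Str.lower c == PySem.Str.lower h)) with
    | some h => some h
    | none => pvPhase1 cs headers

def detect_case_id_column (headers : List String) : Option String :=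
  match pvPhase1 pvCandidates headers with
  | some h => some h
  | none =>
    match headers.find? (fun h => !(h == "") && PySem.Str.isIn "id" (PySem.Str.lower h)) with
    | some h => some h
    | none => headers.head?

-- ===== PORT B =====
-- {c.lower(): i for i, c in enumerate(candidates)}
def pvCandRank : PySem.Dict String Int :=
  (PySem.List.enumerate ["TC_ID", "TestCase_ID", "Case_ID", "ID", "Test_ID", "TCID"]).foldl (fun d p => d.insert (PySem.Str.lower p.2) p.1) PySem.Dict.empty

-- one iteration of B's single loop over headers
def pvStep (best : Option (Int × String)) (h : String) : Option (Int × String) :=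
  if h == "" then best
  else
    let hl := PySem.Str.lower h
    let r : Option Int :=
      match pvCandRank.get? hl with
      | some i => some i
      | none => if PySem.Str.isIn "id" hl then some 100 else none
    match r, best with
    | none, _ => best
    | some rv, none => some (rv, h)
    | some rv, some (br, bh) => if rv < br then some (rv, h) else some (br, bh)

def detect_case_id_column_alt (headers : List String) : Option String :=
  match headers.foldl pvStep none with
  | some (_, h) => some h
  | none => headers.head?

-- ===== PRECONDITION & SPEC =====
def Spec_detect_case_id_column (headers : List String) (out : Option String) : Prop := out = detect_case_id_column_alt headers
instance (headers : List String) (out : Option String) : Decidable (Spec_detect_case_id_column headers out) := by unfold Spec_detect_case_id_column; infer_instance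

-- ===== CLAIM (what is proved, stated in full; the proofs are below) =====
def Claim_equal_detect_case_id_column : Prop := ∀ (headers : List String), Dom_detect_case_id_column headers → Spec_detect_case_id_column headers (detect_case_id_column headers)

-- ===== LEMMAS AND PROOFS =====

-- the rank B assigns to a header (none = the header is skipped)
def pvRank (h : String) : Option Int :=
  if h = "" then none
  else
    match pvCandRank.get? (PySem.Str.lower h) with
    | some i => some i
    | none => if PySem.Str.isIn "id" (PySem.Str.lower h) then some 100 else none

lemma pvStep_eq (best : Option (Int × String)) (h : String) :
    pvStep best h =
      match pvRank h, best with
      | none, b => b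
      | some rv, none => some (rv, h)
      | some rv, some (br, bh) => if rv < br then some (rv, h) else some (br, bh) := by
  unfold pvStep pvRank
  by_cases he : h = ""
  · subst he
    rcases best with _ | ⟨br, bh⟩ <;> rfl
  · have hb : ¬((h == "") = true) := by simpa using he
    rw [if_neg hb, if_neg he]
    split <;> simp_all

-- "first minimum": the earliest header attaining the smallest rank
def pvFM : List String → Option (Int × String)
  | [] => none
  | h :: t =>
    match pvRank h, pvFM t with
    | none, x => x
    | some r, none => some (r, h)
    | some r, some (rt, ht) => if rt < r then some (rt, ht) else some (r, h)

lemma foldl_pvStep (t : List String) (acc : Option (Int × String)) :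
    t.foldl pvStep acc =
      match acc, pvFM t with
      | none, x => x
      | some a, none => some a
      | some (ra, ha), some (rt, ht) => if rt < ra then some (rt, ht) else some (ra, ha) := by
  induction t generalizing acc with
  | nil => cases acc with
    | none => rfl
    | some a => cases a; rfl
  | cons h t ih =>
    simp only [List.foldl_cons, ih, pvStep_eq, pvFM]
    rcases hr : pvRank h with _ | r <;>
      rcases acc with _ | ⟨ra, ha⟩ <;>
      rcases hf : pvFM t with _ | ⟨rt, ht⟩ <;>
      simp only [hr, hf] <;>
      split_ifs <;>
      first
        | rfl
        | (exfalso; omega)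
        | (intros; exfalso; omega)
        | (simp_all; done)
        | (simp_all; omega)
        | (simp_all; intros; exfalso; omega)
        | (split_ifs <;> first | rfl | (exfalso; omega))
        | (simp_all; split_ifs <;> first | rfl | (exfalso; omega))

lemma alt_eq (headers : List String) :
    detect_case_id_column_alt headers =
      match pvFM headers with
      | some (_, h) => some h
      | none => headers.head? := by
  unfold detect_case_id_column_alt
  rw [foldl_pvStep]

-- the dict B builds, as an if-chain
lemma get?_candRank (s : String) : pvCandRank.get? s =
    if "tc_id" == s then some (0 : Int) else if "testcase_id" == s then some 1
    else if "case_id" == s then some 2 else if "id" == s then some 3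
    else if "test_id" == s then some 4 else if "tcid" == s then some 5 else none := by
  have h : pvCandRank = PySem.Dict.mk
      [("tc_id", 0), ("testcase_id", 1), ("case_id", 2), ("id", 3), ("test_id", 4), ("tcid", 5)] := rfl
  have hnil : (PySem.Dict.mk ([] : List (String × Int))).get? s = none := rfl
  rw [h]
  simp only [PySem.Dict.get?_mk_cons, hnil]

-- candidate keys map injectively to their indices
lemma get?_inj (s k : String) (j : Int) (h1 : pvCandRank.get? s = some j)
    (h2 : pvCandRank.get? k = some j) : s = k := by
  rw [get?_candRank] at h1 h2
  split_ifs at h1 h2 <;> simp_all <;> omega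

-- candidate-match predicates of A versus pvRank
lemma rank_eq_key (h k : String) (j : Int) (hjk : pvCandRank.get? k = some j) (hj : j ≠ 100) :
    ((!(h == "")) && (k == PySem.Str.lower h)) = true ↔ pvRank h = some j := by
  constructor
  · intro hp
    simp only [Bool.and_eq_true, beq_iff_eq, Bool.not_eq_true', beq_eq_false_iff_ne] at hp
    obtain ⟨hne, hkk⟩ := hp
    unfold pvRank
    rw [if_neg hne, ← hkk, hjk]
  · intro hr
    unfold pvRank at hr
    by_cases hne : h = ""
    · rw [if_pos hne] at hr; cases hr
    · rw [if_neg hne] at hr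
      rcases hg : pvCandRank.get? (PySem.Str.lower h) with _ | i <;> rw [hg] at hr
      · split_ifs at hr <;> simp_all <;> omega
      · simp only [Option.some.injEq] at hr
        have hk := get?_inj k (PySem.Str.lower h) j hjk (by rw [hg, hr])
        simp [hne, hk]

lemma rank_cand0 (h : String) :
    ((!(h == "")) && (PySem.Str.lower "TC_ID" == PySem.Str.lower h)) = true ↔ pvRank h = some 0 := by
  have hl : PySem.Str.lower "TC_ID" = "tc_id" := by decide
  rw [hl]; exact rank_eq_key h "tc_id" 0 (by decide) (by decide)

lemma rank_cand1 (h : String) :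
    ((!(h == "")) && (PySem.Str.lower "TestCase_ID" == PySem.Str.lower h)) = true ↔ pvRank h = some 1 := by
  have hl : PySem.Str.lower "TestCase_ID" = "testcase_id" := by decide
  rw [hl]; exact rank_eq_key h "testcase_id" 1 (by decide) (by decide)

lemma rank_cand2 (h : String) :
    ((!(h == "")) && (PySem.Str.lower "Case_ID" == PySem.Str.lower h)) = true ↔ pvRank h = some 2 := by
  have hl : PySem.Str.lower "Case_ID" = "case_id" := by decide
  rw [hl]; exact rank_eq_key h "case_id" 2 (by decide) (by decide)

lemma rank_cand3 (h : String) :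
    ((!(h == "")) && (PySem.Str.lower "ID" == PySem.Str.lower h)) = true ↔ pvRank h = some 3 := by
  have hl : PySem.Str.lower "ID" = "id" := by decide
  rw [hl]; exact rank_eq_key h "id" 3 (by decide) (by decide)

lemma rank_cand4 (h : String) :
    ((!(h == "")) && (PySem.Str.lower "Test_ID" == PySem.Str.lower h)) = true ↔ pvRank h = some 4 := by
  have hl : PySem.Str.lower "Test_ID" = "test_id" := by decide
  rw [hl]; exact rank_eq_key h "test_id" 4 (by decide) (by decide)

lemma rank_cand5 (h : String) :
    ((!(h == "")) && (PySem.Str.lower "TCID" == PySem.Str.lower h)) = true ↔ pvRank h = some 5 := by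
  have hl : PySem.Str.lower "TCID" = "tcid" := by decide
  rw [hl]; exact rank_eq_key h "tcid" 5 (by decide) (by decide)

-- A's phase-2 predicate holds exactly on ranked headers (every candidate key contains "id")
lemma rank_isSome_iff (h : String) :
    ((!(h == "")) && PySem.Str.isIn "id" (PySem.Str.lower h)) = true ↔ ∃ j, pvRank h = some j := by
  by_cases hne : h = ""
  · simp [pvRank, hne]
  · unfold pvRank
    rw [if_neg hne]
    rcases hg : pvCandRank.get? (PySem.Str.lower h) with _ | i
    · simp only [hne, Bool.not_eq_true', beq_eq_false_iff_ne, ne_eq, not_false_eq_true,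
        Bool.true_and]
      split_ifs with hin <;> simp_all
    · have hk : PySem.Str.isIn "id" (PySem.Str.lower h) = true := by
        rw [get?_candRank] at hg
        split_ifs at hg with c0 c1 c2 c3 c4 c5
        · rw [← beq_iff_eq.mp c0]; decide
        · rw [← beq_iff_eq.mp c1]; decide
        · rw [← beq_iff_eq.mp c2]; decide
        · rw [← beq_iff_eq.mp c3]; decide
        · rw [← beq_iff_eq.mp c4]; decide
        · rw [← beq_iff_eq.mp c5]; decide
      simp_all

lemma rank_vals (h : String) (j : Int) (hj : pvRank h = some j) :
    j = 0 ∨ j = 1 ∨ j = 2 ∨ j = 3 ∨ j = 4 ∨ j = 5 ∨ j = 100 := by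
  unfold pvRank at hj
  by_cases hne : h = ""
  · rw [if_pos hne] at hj; cases hj
  · rw [if_neg hne, get?_candRank] at hj
    split_ifs at hj <;> simp_all

lemma rank_le_100 (h : String) (j : Int) (hj : pvRank h = some j) : j ≤ 100 := by
  rcases rank_vals h j hj with h' | h' | h' | h' | h' | h' | h' <;> omega

-- first-minimum characterisation of pvFM
lemma fm_none_iff (hs : List String) : pvFM hs = none ↔ ∀ h ∈ hs, pvRank h = none := by
  induction hs with
  | nil => simp [pvFM]
  | cons h t ih =>
    simp only [pvFM]
    rcases hr : pvRank h with _ | r <;> rcases hf : pvFM t with _ | ⟨rt, ht⟩ <;> simp_all <;>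
      split <;> simp_all

lemma fm_some (hs : List String) (r : Int) (h0 : String) (hfm : pvFM hs = some (r, h0)) :
    ∃ pre post, hs = pre ++ h0 :: post ∧ pvRank h0 = some r ∧
      (∀ h' ∈ pre, ∀ r', pvRank h' = some r' → r < r') ∧
      (∀ h' ∈ hs, ∀ r', pvRank h' = some r' → r ≤ r') := by
  induction hs generalizing r h0 with
  | nil => simp [pvFM] at hfm
  | cons h t ih =>
    simp only [pvFM] at hfm
    rcases hr : pvRank h with _ | rh <;> rw [hr] at hfm
    · -- head skipped
      obtain ⟨pre, post, hsp, hr0, hstrict, hmin⟩ := ih r h0 hfm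
      refine ⟨h :: pre, post, by simp [hsp], hr0, ?_, ?_⟩
      · intro h' hh' r' hrr'
        rcases List.mem_cons.mp hh' with rfl | hh'
        · rw [hr] at hrr'; cases hrr'
        · exact hstrict h' hh' r' hrr'
      · intro h' hh' r' hrr'
        rcases List.mem_cons.mp hh' with rfl | hh'
        · rw [hr] at hrr'; cases hrr'
        · exact hmin h' (hsp ▸ hh') r' hrr'
    · rcases hf : pvFM t with _ | ⟨rt, ht⟩ <;> rw [hf] at hfm <;> dsimp only at hfm
      · -- tail empty of ranks: result is (rh, h)
        simp only [Option.some.injEq, Prod.mk.injEq] at hfm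
        obtain ⟨rfl, rfl⟩ := hfm
        have hnone := (fm_none_iff t).1 hf
        refine ⟨[], t, by simp, hr, by simp, ?_⟩
        intro h' hh' r' hrr'
        rcases List.mem_cons.mp hh' with rfl | hh'
        · rw [hr] at hrr'; cases hrr'; omega
        · rw [hnone h' hh'] at hrr'; cases hrr'
      · by_cases hlt : rt < rh
        · rw [if_pos hlt] at hfm
          simp only [Option.some.injEq, Prod.mk.injEq] at hfm
          obtain ⟨rfl, rfl⟩ := hfm
          obtain ⟨pre, post, hsp, hr0, hstrict, hmin⟩ := ih rt ht hf
          refine ⟨h :: pre, post, by simp [hsp], hr0, ?_, ?_⟩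
          · intro h' hh' r' hrr'
            rcases List.mem_cons.mp hh' with rfl | hh'
            · rw [hr] at hrr'; cases hrr'; omega
            · exact hstrict h' hh' r' hrr'
          · intro h' hh' r' hrr'
            rcases List.mem_cons.mp hh' with rfl | hh'
            · rw [hr] at hrr'; cases hrr'; omega
            · exact hmin h' (hsp ▸ hh') r' hrr'
        · rw [if_neg hlt] at hfm
          simp only [Option.some.injEq, Prod.mk.injEq] at hfm
          obtain ⟨rfl, rfl⟩ := hfm
          obtain ⟨pre, post, hsp, hr0, hstrict, hmin⟩ := ih rt ht hf
          refine ⟨[], t, by simp, hr, by simp, ?_⟩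
          intro h' hh' r' hrr'
          rcases List.mem_cons.mp hh' with rfl | hh'
          · rw [hr] at hrr'; cases hrr'; omega
          · have := hmin h' hh' r' hrr'; omega

lemma find?_first {α : Type} (p : α → Bool) (pre : List α) (x : α) (post : List α)
    (hpre : ∀ y ∈ pre, p y = false) (hx : p x = true) :
    List.find? p (pre ++ x :: post) = some x := by
  induction pre with
  | nil => simp [List.find?, hx]
  | cons y ys ih =>
    have hy := hpre y (by simp)
    simp only [List.cons_append, List.find?_cons, hy]
    exact ih (fun z hz => hpre z (by simp [hz]))

lemma phase1_cons (c : String) (cs headers : List String) :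
    pvPhase1 (c :: cs) headers =
      match headers.find? (fun h => !(h == "") && (PySem.Str.lower c == PySem.Str.lower h)) with
      | some h => some h
      | none => pvPhase1 cs headers := rfl

-- the heart of the proof: A computes the first minimally-ranked header too
lemma a_eq (headers : List String) :
    detect_case_id_column headers =
      match pvFM headers with
      | some (_, h) => some h
      | none => headers.head? := by
  rcases hfm : pvFM headers with _ | ⟨r, h0⟩
  · have hall := (fm_none_iff headers).1 hfm
    have hnone : ∀ (c : String) (j : Int),
        (∀ h, ((!(h == "")) && (PySem.Str.lower c == PySem.Str.lower h)) = true ↔ pvRank h = some j) →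
        headers.find? (fun h => !(h == "") && (PySem.Str.lower c == PySem.Str.lower h)) = none := by
      intro c j hiff
      rw [List.find?_eq_none]
      intro h hh hp
      have hcontra := (hiff h).1 hp
      rw [hall h hh] at hcontra
      cases hcontra
    unfold detect_case_id_column
    rw [pvCandidates, phase1_cons, hnone _ 0 rank_cand0, phase1_cons, hnone _ 1 rank_cand1,
        phase1_cons, hnone _ 2 rank_cand2, phase1_cons, hnone _ 3 rank_cand3,
        phase1_cons, hnone _ 4 rank_cand4, phase1_cons, hnone _ 5 rank_cand5]
    have h2 : headers.find? (fun h => !(h == "") && PySem.Str.isIn "id" (PySem.Str.lower h)) = none := by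
      rw [List.find?_eq_none]
      intro h hh hp
      obtain ⟨j, hj⟩ := (rank_isSome_iff h).1 hp
      rw [hall h hh] at hj; cases hj
    rw [h2]
    rfl
  · obtain ⟨pre, post, hsp, hr0, hstrict, hmin⟩ := fm_some headers r h0 hfm
    -- a candidate find? whose rank index i is below the minimum r yields none
    have hlt_none : ∀ (c : String) (i : Int),
        (∀ h, ((!(h == "")) && (PySem.Str.lower c == PySem.Str.lower h)) = true ↔ pvRank h = some i) →
        i < r →
        headers.find? (fun h => !(h == "") && (PySem.Str.lower c == PySem.Str.lower h)) = none := by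
      intro c i hiff hir
      rw [List.find?_eq_none]
      intro h hh hp
      have := hmin h hh i ((hiff h).1 hp)
      omega
    -- the candidate find? whose rank index equals r yields h0
    have heq_some : ∀ (c : String),
        (∀ h, ((!(h == "")) && (PySem.Str.lower c == PySem.Str.lower h)) = true ↔ pvRank h = some r) →
        headers.find? (fun h => !(h == "") && (PySem.Str.lower c == PySem.Str.lower h)) = some h0 := by
      intro c hiff
      rw [hsp]
      apply find?_first
      · intro y hy
        by_contra hpy
        have hpy' : ((!(y == "")) && (PySem.Str.lower c == PySem.Str.lower y)) = true := by
          simpa using hpy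
        have := hstrict y hy r ((hiff y).1 hpy')
        omega
      · exact (hiff h0).2 hr0
    unfold detect_case_id_column
    rcases rank_vals h0 r hr0 with rfl | rfl | rfl | rfl | rfl | rfl | rfl
    · rw [pvCandidates, phase1_cons, heq_some _ rank_cand0]
    · rw [pvCandidates, phase1_cons, hlt_none _ 0 rank_cand0 (by omega),
          phase1_cons, heq_some _ rank_cand1]
    · rw [pvCandidates, phase1_cons, hlt_none _ 0 rank_cand0 (by omega),
          phase1_cons, hlt_none _ 1 rank_cand1 (by omega),
          phase1_cons, heq_some _ rank_cand2]
    · rw [pvCandidates, phase1_cons, hlt_none _ 0 rank_cand0 (by omega),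
          phase1_cons, hlt_none _ 1 rank_cand1 (by omega),
          phase1_cons, hlt_none _ 2 rank_cand2 (by omega),
          phase1_cons, heq_some _ rank_cand3]
    · rw [pvCandidates, phase1_cons, hlt_none _ 0 rank_cand0 (by omega),
          phase1_cons, hlt_none _ 1 rank_cand1 (by omega),
          phase1_cons, hlt_none _ 2 rank_cand2 (by omega),
          phase1_cons, hlt_none _ 3 rank_cand3 (by omega),
          phase1_cons, heq_some _ rank_cand4]
    · rw [pvCandidates, phase1_cons, hlt_none _ 0 rank_cand0 (by omega),
          phase1_cons, hlt_none _ 1 rank_cand1 (by omega),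
          phase1_cons, hlt_none _ 2 rank_cand2 (by omega),
          phase1_cons, hlt_none _ 3 rank_cand3 (by omega),
          phase1_cons, hlt_none _ 4 rank_cand4 (by omega),
          phase1_cons, heq_some _ rank_cand5]
    · -- r = 100: every candidate scan fails, phase 2 finds h0
      rw [pvCandidates, phase1_cons, hlt_none _ 0 rank_cand0 (by omega),
          phase1_cons, hlt_none _ 1 rank_cand1 (by omega),
          phase1_cons, hlt_none _ 2 rank_cand2 (by omega),
          phase1_cons, hlt_none _ 3 rank_cand3 (by omega),
          phase1_cons, hlt_none _ 4 rank_cand4 (by omega),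
          phase1_cons, hlt_none _ 5 rank_cand5 (by omega)]
      have h2 : headers.find? (fun h => !(h == "") && PySem.Str.isIn "id" (PySem.Str.lower h)) = some h0 := by
        rw [hsp]
        apply find?_first
        · intro y hy
          by_contra hpy
          have hpy' : ((!(y == "")) && PySem.Str.isIn "id" (PySem.Str.lower y)) = true := by
            simpa using hpy
          obtain ⟨j, hj⟩ := (rank_isSome_iff y).1 hpy'
          have h1 := hstrict y hy j hj
          have h2 := rank_le_100 y j hj
          omega
        · exact (rank_isSome_iff h0).2 ⟨100, hr0⟩
      rw [h2]
      rfl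

-- ===== VERDICT (by name: the statement is the Claim_ definition above) =====
theorem detect_case_id_column_spec : Claim_equal_detect_case_id_column := by
  intro headers _
  unfold Spec_detect_case_id_column
  rw [a_eq, alt_eq]
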